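-- pv_equiv track=rewrite | github.com/DarynaBerezniuk/Team7_Recommendation_system | added_hobby_output.py | extend_disliked_with_neighbors
-- ===== SOURCE A (Python) =====
-- def extend_disliked_with_neighbors(likes, disliked_users):
--     """
--     1
--     """
--     extended: set[str] = set(disliked_users)
--
--     for d in disliked_users:
--         extended.update(likes.get(d, set()))
--
--     for u, neighs in likes.items():
--         for d in disliked_users:
--             if d in neighs:
--                 extended.add(u)
--
--     return extended
-- ===== SOURCE B (Python) =====
-- def extend_disliked_with_neighbors(likes, disliked_users):
--     # Reverse adjacency index replaces the per-node scan over disliked_users.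
--     rev = {}
--     for u, neighs in likes.items():
--         for v in neighs:
--             rev.setdefault(v, set()).add(u)
--
--     backs = set()
--     for d in disliked_users:
--         backs.update(rev.get(d, set()))
--
--     extended = set(disliked_users)
--     for d in disliked_users:
--         extended.update(likes.get(d, set()))
--
--     for u in likes:
--         if u in backs:
--             extended.add(u)
--
--     return extended
-- ===== Notes on version B (the rewrite author's own statement) =====
-- stated objective: faster
-- what changed: Replaces the backward nested scan (every graph node tested against every disliked user) with a reverse adjacency index built in one pass over the edges, so back-neighbours are found by direct lookup per disliked user.
import Mathlib
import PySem

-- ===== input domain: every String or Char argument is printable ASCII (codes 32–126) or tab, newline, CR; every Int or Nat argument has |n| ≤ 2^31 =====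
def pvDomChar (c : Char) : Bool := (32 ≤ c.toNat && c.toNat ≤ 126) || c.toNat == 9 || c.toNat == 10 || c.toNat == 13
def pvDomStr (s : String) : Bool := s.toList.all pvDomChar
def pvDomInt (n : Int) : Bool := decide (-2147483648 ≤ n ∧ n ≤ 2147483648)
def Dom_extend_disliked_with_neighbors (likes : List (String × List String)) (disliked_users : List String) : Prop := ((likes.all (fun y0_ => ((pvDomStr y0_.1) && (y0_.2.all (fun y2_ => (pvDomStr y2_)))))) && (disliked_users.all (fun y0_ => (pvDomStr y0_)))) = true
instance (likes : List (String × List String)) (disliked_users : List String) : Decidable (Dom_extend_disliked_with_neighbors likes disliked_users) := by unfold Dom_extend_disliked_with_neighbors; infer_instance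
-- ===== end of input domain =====

-- ===== PORT A =====
-- B replaces A's backward nested scan with a reverse adjacency index (faster on large graphs).
def extend_disliked_with_neighbors (likes : List (String × List String)) (disliked_users : List String) : List String :=
  let extended : PySem.Set String := PySem.Set.ofList disliked_users
  let extended := disliked_users.foldl
    (fun s d => PySem.Set.update s ((PySem.Dict.mk likes).getD d [])) extended
  likes.foldl
    (fun s p => disliked_users.foldl
      (fun s d => if p.2.contains d then PySem.Set.add s p.1 else s) s)
    extended

-- ===== PORT B =====
def extend_disliked_with_neighbors_alt (likes : List (String × List String)) (disliked_users : List String) : List String :=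
  let rev : PySem.Dict String (PySem.Set String) :=
    likes.foldl
      (fun r p => p.2.foldl
        (fun r v => r.modify v PySem.Set.empty (fun s => PySem.Set.add s p.1)) r)
      PySem.Dict.empty
  let backs : PySem.Set String :=
    disliked_users.foldl (fun s d => PySem.Set.update s (rev.getD d PySem.Set.empty)) PySem.Set.empty
  let extended : PySem.Set String := PySem.Set.ofList disliked_users
  let extended := disliked_users.foldl
    (fun s d => PySem.Set.update s ((PySem.Dict.mk likes).getD d [])) extended
  likes.foldl (fun s p => if backs.contains p.1 then PySem.Set.add s p.1 else s) extended

-- ===== PRECONDITION & SPEC =====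
-- Pre_ requires the keys of `likes` to be pairwise distinct: that is the invariant of every Python dict,
-- so no Python-representable input is excluded; it only rules out duplicate-key association lists.
def Pre_extend_disliked_with_neighbors (likes : List (String × List String)) (disliked_users : List String) : Prop :=
  (likes.map Prod.fst).Nodup
instance (likes : List (String × List String)) (disliked_users : List String) : Decidable (Pre_extend_disliked_with_neighbors likes disliked_users) := by unfold Pre_extend_disliked_with_neighbors; infer_instance

def pvWitness_extend_disliked_with_neighbors : (List (String × List String)) × List String :=
  ([("alice", ["bob", "carol"]), ("bob", ["alice"])], ["carol"])

def Spec_extend_disliked_with_neighbors (likes : List (String × List String)) (disliked_users : List String) (out : List String) : Prop := out = extend_disliked_with_neighbors_alt likes disliked_users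
instance (likes : List (String × List String)) (disliked_users : List String) (out : List String) : Decidable (Spec_extend_disliked_with_neighbors likes disliked_users out) := by unfold Spec_extend_disliked_with_neighbors; infer_instance

-- ===== CLAIM (what is proved, stated in full; the proofs are below) =====
def Claim_equal_extend_disliked_with_neighbors : Prop := ∀ (likes : List (String × List String)) (disliked_users : List String), Dom_extend_disliked_with_neighbors likes disliked_users → Pre_extend_disliked_with_neighbors likes disliked_users → Spec_extend_disliked_with_neighbors likes disliked_users (extend_disliked_with_neighbors likes disliked_users)

-- ===== LEMMAS AND PROOFS =====

-- adding the same element twice is adding it once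
theorem pv_add_idem (s : PySem.Set String) (u : String) :
    PySem.Set.add (PySem.Set.add s u) u = PySem.Set.add s u := by
  apply PySem.Set.add_of_mem
  exact (PySem.Set.mem_add _ u u).mpr (Or.inr rfl)

-- A's inner loop over disliked_users adds u once iff some disliked user is a neighbour
theorem pv_inner_collapse (ds neighs : List String) (u : String) (s : PySem.Set String) :
    ds.foldl (fun s d => if neighs.contains d then PySem.Set.add s u else s) s
      = if ds.any (fun d => neighs.contains d) then PySem.Set.add s u else s := by
  induction ds generalizing s with
  | nil => simp
  | cons d ds ih =>
    rw [List.foldl_cons, List.any_cons, ih]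
    by_cases h : neighs.contains d = true
    · rw [if_pos h, h, Bool.true_or]
      by_cases h2 : (ds.any fun d => neighs.contains d) = true
      · rw [if_pos h2, if_pos rfl, pv_add_idem]
      · rw [if_neg h2, if_pos rfl]
    · have h' : neighs.contains d = false := by simpa using h
      rw [if_neg h, h', Bool.false_or]

-- membership in the reverse index after processing one adjacency list
theorem pv_rev_inner (neighs : List String) (u0 : String)
    (r : PySem.Dict String (PySem.Set String)) (u d : String) :
    u ∈ (neighs.foldl (fun r v => r.modify v PySem.Set.empty (fun s => PySem.Set.add s u0)) r).getD d PySem.Set.empty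
      ↔ u ∈ r.getD d PySem.Set.empty ∨ (u = u0 ∧ neighs.contains d = true) := by
  induction neighs generalizing r with
  | nil => simp
  | cons v vs ih =>
    rw [List.foldl_cons, ih]
    by_cases hv : d = v
    · subst hv
      rw [PySem.Dict.getD_modify, if_pos rfl]
      simp only [PySem.Set.mem_add, List.contains_cons, BEq.rfl, Bool.true_or]
      tauto
    · rw [PySem.Dict.getD_modify, if_neg hv]
      simp [hv]

-- membership in the full reverse index
theorem pv_rev_mem (likes : List (String × List String))
    (r : PySem.Dict String (PySem.Set String)) (u d : String) :
    u ∈ (likes.foldl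
          (fun r p => p.2.foldl
            (fun r v => r.modify v PySem.Set.empty (fun s => PySem.Set.add s p.1)) r)
          r).getD d PySem.Set.empty
      ↔ u ∈ r.getD d PySem.Set.empty ∨ ∃ p ∈ likes, p.1 = u ∧ p.2.contains d = true := by
  induction likes generalizing r with
  | nil => simp
  | cons q qs ih =>
    simp only [List.foldl_cons, ih, pv_rev_inner, List.exists_mem_cons_iff]
    tauto

-- membership in backs
theorem pv_backs_mem (ds : List String) (rev : PySem.Dict String (PySem.Set String))
    (s : PySem.Set String) (u : String) :
    u ∈ ds.foldl (fun s d => PySem.Set.update s (rev.getD d PySem.Set.empty)) s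
      ↔ u ∈ s ∨ ∃ d ∈ ds, u ∈ rev.getD d PySem.Set.empty := by
  induction ds generalizing s with
  | nil => simp
  | cons d ds ih =>
    simp only [List.foldl_cons, ih, PySem.Set.mem_update, List.mem_cons]
    constructor
    · rintro ((h | h) | ⟨e, he, hm⟩)
      · exact Or.inl h
      · exact Or.inr ⟨d, Or.inl rfl, h⟩
      · exact Or.inr ⟨e, Or.inr he, hm⟩
    · rintro (h | ⟨e, (rfl | he), hm⟩)
      · exact Or.inl (Or.inl h)
      · exact Or.inl (Or.inr hm)
      · exact Or.inr ⟨e, he, hm⟩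

-- two entries of a Nodup-keyed association list with equal keys are equal
theorem pv_key_inj {l : List (String × List String)} (hnd : (l.map Prod.fst).Nodup)
    {p q : String × List String} (hp : p ∈ l) (hq : q ∈ l) (h : p.1 = q.1) : p = q := by
  induction l with
  | nil => cases hp
  | cons a l ih =>
    rw [List.map_cons, List.nodup_cons] at hnd
    rcases List.mem_cons.mp hp with rfl | hp' <;> rcases List.mem_cons.mp hq with rfl | hq'
    · rfl
    · exact absurd (List.mem_map.mpr ⟨q, hq', h.symm⟩) hnd.1
    · exact absurd (List.mem_map.mpr ⟨p, hp', h⟩) hnd.1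
    · exact ih hnd.2 hp' hq'

-- for an entry p of likes (Nodup keys), `p.1 in backs` tests exactly A's inner condition
theorem pv_backs_iff (likes : List (String × List String)) (disliked_users : List String)
    (hnd : (likes.map Prod.fst).Nodup) (p : String × List String) (hp : p ∈ likes) :
    PySem.Set.contains
        (disliked_users.foldl
          (fun s d => PySem.Set.update s
            ((likes.foldl
              (fun r q => q.2.foldl
                (fun r v => r.modify v PySem.Set.empty (fun s => PySem.Set.add s q.1)) r)
              PySem.Dict.empty).getD d PySem.Set.empty))
          PySem.Set.empty)
        p.1
      = disliked_users.any (fun d => p.2.contains d) := by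
  rw [Bool.eq_iff_iff, PySem.Set.contains_iff, List.any_eq_true]
  rw [pv_backs_mem]
  constructor
  · rintro (h | ⟨d, hd, hm⟩)
    · simp at h
    · rcases (pv_rev_mem likes PySem.Dict.empty p.1 d).mp hm with h | ⟨q, hq, hq1, hq2⟩
      · simp at h
      · exact ⟨d, hd, (pv_key_inj hnd hq hp hq1) ▸ hq2⟩
  · rintro ⟨d, hd, hc⟩
    exact Or.inr ⟨d, hd, (pv_rev_mem likes PySem.Dict.empty p.1 d).mpr (Or.inr ⟨p, hp, rfl, hc⟩)⟩

-- ===== VERDICT (by name: the statement is the Claim_ definition above) =====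
theorem extend_disliked_with_neighbors_spec : Claim_equal_extend_disliked_with_neighbors := by
  intro likes disliked_users _ hnd
  unfold Spec_extend_disliked_with_neighbors
  unfold extend_disliked_with_neighbors extend_disliked_with_neighbors_alt
  dsimp only
  apply PySem.List.foldl_congr_mem
  intro acc p hp
  rw [pv_inner_collapse, pv_backs_iff likes disliked_users hnd p hp]
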